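-- pv_equiv track=rewrite | github.com/alex-huff/advent-of-code-2020 | day4.py | seperateByBlankLines
-- ===== SOURCE A (Python) =====
-- def seperateByBlankLines(data):
--     start = 0
--     passportStarted = False
--     seperated = []
--
--     for i in range(len(data)):
--         if not data[i].isspace():
--             if not passportStarted:
--                 start = i
--                 passportStarted = True
--         else:
--             if passportStarted:
--                 seperated.append(data[start:i])
--
--                 passportStarted = False
--
--     if passportStarted:
--         seperated.append(data[start:len(data)])
--
--     return seperated
-- ===== SOURCE B (Python) =====
-- def seperateByBlankLines(data):
--     result = []
--     current = []
--     for element in data: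
--         if element.isspace():
--             if current:
--                 result.append(current)
--                 current = []
--         else:
--             current.append(element)
--     if current:
--         result.append(current)
--     return result
-- ===== Notes on version B (the rewrite author's own statement) =====
-- stated objective: idiomatic
-- what changed: B builds each group incrementally with a current-group accumulator flushed at blank lines, instead of tracking a start index plus a started flag and slicing data[start:i].
import Mathlib
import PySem

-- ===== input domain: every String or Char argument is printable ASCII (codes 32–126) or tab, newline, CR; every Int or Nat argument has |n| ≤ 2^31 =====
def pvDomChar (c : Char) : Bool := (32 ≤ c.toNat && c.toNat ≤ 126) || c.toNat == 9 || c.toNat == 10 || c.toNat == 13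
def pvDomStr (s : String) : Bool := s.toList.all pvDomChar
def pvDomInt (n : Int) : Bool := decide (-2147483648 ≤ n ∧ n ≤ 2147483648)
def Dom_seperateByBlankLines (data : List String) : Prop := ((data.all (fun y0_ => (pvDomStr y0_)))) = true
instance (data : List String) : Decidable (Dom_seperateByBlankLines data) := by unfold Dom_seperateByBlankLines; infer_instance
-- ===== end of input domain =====

-- B replaces A's start-index/started-flag bookkeeping plus slicing with an
-- incremental current-group accumulator (idiomatic; same cost).

-- ===== PORT A =====
-- the for-i-in-range loop of A, as structural recursion on the index i,
-- carrying A's state (start, passportStarted, seperated); the trailing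
-- 'if passportStarted' flush is the base case.
def seperateByBlankLinesLoopA (data : List String) (i : Nat) (start : Nat)
    (started : Bool) (sep : List (List String)) : List (List String) :=
  if _h : i < data.length then
    if ¬ PySem.Str.strIsspace (PySem.List.pyGetD data (i : Int) "") then
      if ¬ started then
        seperateByBlankLinesLoopA data (i + 1) i true sep
      else
        seperateByBlankLinesLoopA data (i + 1) start started sep
    else
      if started then
        seperateByBlankLinesLoopA data (i + 1) start false
          (sep ++ [PySem.List.slice data (some (start : Int)) (some (i : Int))])
      else
        seperateByBlankLinesLoopA data (i + 1) start started sep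
  else
    if started then
      sep ++ [PySem.List.slice data (some (start : Int)) (some (data.length : Int))]
    else
      sep
termination_by data.length - i

def seperateByBlankLines (data : List String) : List (List String) :=
  seperateByBlankLinesLoopA data 0 0 false []

-- ===== PORT B =====
-- B's loop over the elements themselves, carrying (current, result).
def seperateByBlankLinesLoopB (xs : List String) (cur : List String)
    (res : List (List String)) : List (List String) :=
  match xs with
  | [] => if cur.isEmpty then res else res ++ [cur]
  | x :: t =>
    if PySem.Str.strIsspace x then
      if cur.isEmpty then seperateByBlankLinesLoopB t cur res
      else seperateByBlankLinesLoopB t [] (res ++ [cur])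
    else seperateByBlankLinesLoopB t (cur ++ [x]) res

def seperateByBlankLines_alt (data : List String) : List (List String) :=
  seperateByBlankLinesLoopB data [] []

-- ===== PRECONDITION & SPEC =====
def Spec_seperateByBlankLines (data : List String) (out : List (List String)) : Prop := out = seperateByBlankLines_alt data
instance (data : List String) (out : List (List String)) : Decidable (Spec_seperateByBlankLines data out) := by unfold Spec_seperateByBlankLines; infer_instance

-- ===== CLAIM (what is proved, stated in full; the proofs are below) =====
def Claim_equal_seperateByBlankLines : Prop := ∀ (data : List String), Dom_seperateByBlankLines data → Spec_seperateByBlankLines data (seperateByBlankLines data)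

-- ===== LEMMAS AND PROOFS =====

theorem seperateByBlankLines_loop_eq (data : List String) (i start : Nat)
    (started : Bool) (sep : List (List String)) (cur : List String)
    (hle : i ≤ data.length)
    (hst : started = true → start < i ∧ cur = (data.drop start).take (i - start))
    (hns : started = false → cur = []) :
    seperateByBlankLinesLoopA data i start started sep =
      seperateByBlankLinesLoopB (data.drop i) cur sep := by
  by_cases h : i < data.length
  · -- step case
    have hdrop : data.drop i = data[i] :: data.drop (i + 1) :=
      List.drop_eq_getElem_cons h
    have hget : PySem.List.pyGetD data (i : Int) "" = data[i] := by
      simp [PySem.List.pyGetD_natCast, List.getD_eq_getElem?_getD, h]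
    rw [seperateByBlankLinesLoopA, dif_pos h, hget, hdrop]
    have hcur_ne : started = true → cur.isEmpty = false := by
      intro hs
      obtain ⟨hlt, hc⟩ := hst hs
      have : 0 < cur.length := by
        rw [hc, List.length_take]
        simp [List.length_drop]; omega
      simpa [List.isEmpty_iff_length_eq_zero] using Nat.pos_iff_ne_zero.mp this
    have hext : started = true →
        cur ++ [data[i]] = (data.drop start).take (i + 1 - start) := by
      intro hs
      obtain ⟨hlt, hc⟩ := hst hs
      have h1 : i + 1 - start = (i - start) + 1 := by omega
      have h2 : (data.drop start)[i - start]? = some data[i] := by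
        rw [List.getElem?_drop]
        have : start + (i - start) = i := by omega
        rw [this]
        exact List.getElem?_eq_getElem h
      rw [h1, List.take_add_one, h2, hc]
      rfl
    by_cases hsp : PySem.Str.strIsspace data[i] = true
    · -- blank line
      rw [if_neg (not_not_intro hsp), seperateByBlankLinesLoopB, if_pos hsp]
      cases started with
      | false =>
        rw [if_neg (by simp), hns rfl, if_pos (by simp)]
        exact seperateByBlankLines_loop_eq data (i+1) start false sep []
          (by omega) (by simp) (fun _ => rfl)
      | true =>
        rw [if_pos rfl, if_neg (by simp [hcur_ne rfl])]
        have hslice : PySem.List.slice data (some (start : Int)) (some (i : Int)) = cur := by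
          rw [PySem.List.slice_natCast, (hst rfl).2]
        rw [hslice]
        exact seperateByBlankLines_loop_eq data (i+1) start false (sep ++ [cur]) []
          (by omega) (by simp) (fun _ => rfl)
    · -- content line
      rw [if_pos hsp, seperateByBlankLinesLoopB, if_neg hsp]
      cases started with
      | false =>
        rw [if_pos (by simp), hns rfl]
        refine seperateByBlankLines_loop_eq data (i+1) i true sep ([] ++ [data[i]])
          (by omega) ?_ (by simp)
        intro _
        refine ⟨by omega, ?_⟩
        rw [show i + 1 - i = 1 from by omega, hdrop]
        rfl
      | true =>
        rw [if_neg (by simp)]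
        refine seperateByBlankLines_loop_eq data (i+1) start true sep (cur ++ [data[i]])
          (by omega) ?_ (by simp)
        intro _
        obtain ⟨hlt, _⟩ := hst rfl
        exact ⟨by omega, hext rfl⟩
  · -- exit case: i = data.length
    have hi : i = data.length := by omega
    rw [seperateByBlankLinesLoopA, dif_neg h]
    have hd : data.drop i = [] := by rw [hi]; simp
    rw [hd, seperateByBlankLinesLoopB]
    cases started with
    | false => simp [hns rfl]
    | true =>
      obtain ⟨hlt, hc⟩ := hst rfl
      have hcur_ne : cur.isEmpty = false := by
        have : 0 < cur.length := by
          rw [hc, List.length_take]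
          simp [List.length_drop]; omega
        simpa [List.isEmpty_iff_length_eq_zero] using Nat.pos_iff_ne_zero.mp this
      rw [if_pos rfl, if_neg (by simp [hcur_ne])]
      have hslice : PySem.List.slice data (some (start : Int)) (some (data.length : Int)) = cur := by
        rw [PySem.List.slice_natCast, hc, hi]
      rw [hslice]
termination_by data.length - i

-- ===== VERDICT (by name: the statement is the Claim_ definition above) =====
theorem seperateByBlankLines_spec : Claim_equal_seperateByBlankLines := by
  intro data _
  unfold Spec_seperateByBlankLines seperateByBlankLines seperateByBlankLines_alt
  simpa using seperateByBlankLines_loop_eq data 0 0 false [] [] (Nat.zero_le _)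
    (by simp) (fun _ => rfl)
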